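-- pv_equiv track=rewrite | github.com/erkantare07/Advanced-Algorithms-Example-Implementations | Dynamic Programming/subset_sums_and_knapsack.py | recursive_subset_sum
-- ===== SOURCE A (Python) =====
-- def recursive_subset_sum(W, Wmax, n, use_memoization=False): # W is the set of non-negative integers, target is the sum to be achieved, n is the number of elements in the set
--     M = [[[] for _ in range(Wmax+1)] for _ in range(n+1)] # memo[n][target] will store the subset with sum closest to target for the first n elements of W
--
--     def recur(W, target, n):
--         if target <= 0 or n == 0:
--             return []
--
--         if use_memoization and M[n][target]:
--             return M[n][target]
--
--         if W[n-1] > target: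
--             return recur(W, target, n-1) # exclude the current element
--
--         exclude = recur(W, target, n-1) # exclude the current element
--         include = [W[n-1]] + recur(W, target - W[n-1], n-1) # include the current element
--
--         best = max(exclude, include, key=sum)
--         M[n][target] = best
--         return best
--
--     return recur(W, Wmax, n)
-- ===== SOURCE B (Python) =====
-- def recursive_subset_sum(W, Wmax, n, use_memoization=False):
--     # Bottom-up DP over targets: row[t] is the best (max-sum) subset of the
--     # items processed so far whose sum is <= t; each item updates the whole row.
--     if Wmax <= 0:
--         return []
--     row = [[] for _ in range(Wmax + 1)]
--     for k in range(n):
--         w = W[k]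
--         new = []
--         for t in range(Wmax + 1):
--             best = row[t]
--             if 0 <= w <= t:
--                 cand = [w] + row[t - w]
--                 if sum(cand) > sum(best):
--                     best = cand
--             new.append(best)
--         row = new
--     return row[Wmax]
-- ===== Notes on version B (the rewrite author's own statement) =====
-- stated objective: alternative
-- what changed: Replaced A's top-down recursion with an optional truthiness-gated memo table by an iterative bottom-up DP that sweeps one row of best subsets per item, making the result independent of use_memoization.
-- outside the precondition, e.g. on recursive_subset_sum([-5], 3, 1, False): A returns [], B returns []
import Mathlib
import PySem

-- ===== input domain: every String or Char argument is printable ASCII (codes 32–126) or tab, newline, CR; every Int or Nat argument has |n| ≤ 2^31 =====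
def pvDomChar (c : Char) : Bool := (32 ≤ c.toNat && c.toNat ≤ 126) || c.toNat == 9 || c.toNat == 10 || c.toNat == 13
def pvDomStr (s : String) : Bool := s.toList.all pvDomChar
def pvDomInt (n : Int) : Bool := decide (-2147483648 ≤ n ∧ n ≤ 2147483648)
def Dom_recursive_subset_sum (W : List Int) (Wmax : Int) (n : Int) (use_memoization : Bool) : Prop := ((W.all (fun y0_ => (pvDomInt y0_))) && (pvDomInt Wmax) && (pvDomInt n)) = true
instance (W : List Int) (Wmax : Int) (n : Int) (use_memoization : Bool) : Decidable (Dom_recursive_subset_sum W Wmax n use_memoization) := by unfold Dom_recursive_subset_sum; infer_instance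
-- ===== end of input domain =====

-- B replaces A's top-down recursion (with optional memo table) by an iterative bottom-up DP, one row of best subsets per item; the result no longer depends on use_memoization.


-- ===== PORT A =====
-- A's nested `recur`, with the memo table M (Python: list of lists) modelled as a Dict
-- keyed by (n, target); the fuel argument only guards termination (under Pre_ the
-- recursion depth is n, so fuel = n.toNat + 1 is never exhausted).
def pvRecurA (W : List Int) (useMemo : Bool) :
    Nat → Int → Int → PySem.Dict (Int × Int) (List Int) →
    List Int × PySem.Dict (Int × Int) (List Int)
  | 0, _, _, M => ([], M)
  | fuel+1, target, n, M =>
    if target ≤ 0 ∨ n = 0 then ([], M)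
    else
      let hit := M.getD (n, target) []
      if useMemo ∧ hit ≠ [] then (hit, M)
      else
        let w := PySem.List.pyGetD W (n - 1) 0       -- W[n-1]; in range under Pre_
        if w > target then pvRecurA W useMemo fuel target (n - 1) M
        else
          let em := pvRecurA W useMemo fuel target (n - 1) M
          let im := pvRecurA W useMemo fuel (target - w) (n - 1) em.2
          let include_ := w :: im.1
          let best := if include_.sum > em.1.sum then include_ else em.1  -- max(exclude, include, key=sum)
          (best, im.2.insert (n, target) best)

def recursive_subset_sum (W : List Int) (Wmax : Int) (n : Int) (use_memoization : Bool) : List Int :=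
  (pvRecurA W use_memoization (n.toNat + 1) Wmax n PySem.Dict.empty).1

-- ===== PORT B =====
-- Bottom-up DP: row[t] = best subset of the items processed so far with sum ≤ t.
def recursive_subset_sum_alt (W : List Int) (Wmax : Int) (n : Int) (use_memoization : Bool) : List Int :=
  if Wmax ≤ 0 then []
  else
    let row0 : List (List Int) := (PySem.List.pyRange 0 (Wmax + 1) 1).map (fun _ => ([] : List Int))
    let row := (PySem.List.pyRange 0 n 1).foldl
      (fun row k =>
        let w := PySem.List.pyGetD W k 0               -- W[k]; in range under Pre_
        (PySem.List.pyRange 0 (Wmax + 1) 1).foldl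
          (fun acc t =>
            let best := PySem.List.pyGetD row t []
            let best :=
              if 0 ≤ w ∧ w ≤ t then
                let cand := w :: PySem.List.pyGetD row (t - w) []
                if cand.sum > best.sum then cand else best
              else best
            acc ++ [best]) [])
      row0
    PySem.List.pyGetD row Wmax []

-- ===== PRECONDITION & SPEC =====
-- Pre_ excludes n outside [0, len(W)] when Wmax > 0 (A then hits a wraparound IndexError or
-- unbounded recursion → RecursionError) and negative weights among the first n items when
-- Wmax > 0 (A's unconditional memo write M[n][target] then indexes out of range, an
-- IndexError, on all but degenerate such inputs — on those degenerate ones A and B happen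
-- to return the same value).
def Pre_recursive_subset_sum (W : List Int) (Wmax : Int) (n : Int) (use_memoization : Bool) : Prop :=
  Wmax ≤ 0 ∨ (0 ≤ n ∧ n ≤ W.length ∧ ∀ w ∈ W.take n.toNat, 0 ≤ w)
instance (W : List Int) (Wmax : Int) (n : Int) (use_memoization : Bool) : Decidable (Pre_recursive_subset_sum W Wmax n use_memoization) := by unfold Pre_recursive_subset_sum; infer_instance

def pvWitness_recursive_subset_sum : List Int × Int × Int × Bool := ([3, 5, 2], 8, 3, true)

def Spec_recursive_subset_sum (W : List Int) (Wmax : Int) (n : Int) (use_memoization : Bool) (out : List Int) : Prop := out = recursive_subset_sum_alt W Wmax n use_memoization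
instance (W : List Int) (Wmax : Int) (n : Int) (use_memoization : Bool) (out : List Int) : Decidable (Spec_recursive_subset_sum W Wmax n use_memoization out) := by unfold Spec_recursive_subset_sum; infer_instance

-- ===== CLAIM (what is proved, stated in full; the proofs are below) =====
def Claim_equal_recursive_subset_sum : Prop := ∀ (W : List Int) (Wmax : Int) (n : Int) (use_memoization : Bool), Dom_recursive_subset_sum W Wmax n use_memoization → Pre_recursive_subset_sum W Wmax n use_memoization → Spec_recursive_subset_sum W Wmax n use_memoization (recursive_subset_sum W Wmax n use_memoization)

-- ===== LEMMAS AND PROOFS =====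


def pureRec (W : List Int) : Nat → Int → List Int
  | 0, _ => []
  | k+1, t =>
    if t ≤ 0 then []
    else
      let w := PySem.List.pyGetD W (k : Int) 0
      if w > t then pureRec W k t
      else
        let e := pureRec W k t
        let i := w :: pureRec W k (t - w)
        if i.sum > e.sum then i else e

lemma pureRec_nonpos (W : List Int) (k : Nat) (t : Int) (ht : t ≤ 0) : pureRec W k t = [] := by
  cases k with
  | zero => rfl
  | succ k => simp [pureRec, ht]


-- every entry of the memo table equals the pure recursion at its key
def InvM (W : List Int) (M : PySem.Dict (Int × Int) (List Int)) : Prop :=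
  ∀ k t v, M.get? (k, t) = some v → v = pureRec W k.toNat t

lemma recA_correct (W : List Int) (b : Bool) :
    ∀ fuel n target M, InvM W M → 0 ≤ n → n.toNat < fuel →
      (pvRecurA W b fuel target n M).1 = pureRec W n.toNat target ∧
      InvM W (pvRecurA W b fuel target n M).2 := by
  intro fuel
  induction fuel with
  | zero => intro n target M _ _ h; omega
  | succ f ih =>
    intro n target M hM hn hfuel
    rw [pvRecurA]
    by_cases hbase : target ≤ 0 ∨ n = 0
    · rw [if_pos hbase]
      refine ⟨?_, hM⟩
      rcases hbase with h | h
      · exact (pureRec_nonpos W n.toNat target h).symm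
      · subst h; rfl
    · rw [if_neg hbase]
      push Not at hbase
      obtain ⟨ht, hn0⟩ := hbase
      obtain ⟨k, hk⟩ : ∃ k : Nat, n.toNat = k + 1 := ⟨n.toNat - 1, by omega⟩
      have hcast : ((k : Int)) = n - 1 := by omega
      have hk' : (n - 1).toNat = k := by omega
      have hpure : pureRec W n.toNat target =
          (if PySem.List.pyGetD W (n-1) 0 > target then pureRec W k target
           else if (PySem.List.pyGetD W (n-1) 0 :: pureRec W k (target - PySem.List.pyGetD W (n-1) 0)).sum > (pureRec W k target).sum
                then PySem.List.pyGetD W (n-1) 0 :: pureRec W k (target - PySem.List.pyGetD W (n-1) 0)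
                else pureRec W k target) := by
        rw [hk, pureRec, if_neg (by omega), hcast]
      by_cases hmemo : b = true ∧ PySem.Dict.getD M (n, target) [] ≠ []
      · rw [if_pos (by simpa using hmemo)]
        refine ⟨?_, hM⟩
        rcases hget : M.get? (n, target) with _ | v
        · exact absurd (by rw [PySem.Dict.getD_eq_get?_getD, hget]; rfl) hmemo.2
        · have := hM n target v hget
          rw [PySem.Dict.getD_eq_get?_getD, hget]
          simpa using this
      · rw [if_neg (by simpa using hmemo)]
        by_cases hwgt : PySem.List.pyGetD W (n-1) 0 > target
        · rw [if_pos hwgt]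
          have := ih (n-1) target M hM (by omega) (by omega)
          rw [hk'] at this
          exact ⟨by rw [this.1, hpure, if_pos hwgt], this.2⟩
        · rw [if_neg hwgt]
          have hex := ih (n-1) target M hM (by omega) (by omega)
          rw [hk'] at hex
          have hin := ih (n-1) (target - PySem.List.pyGetD W (n-1) 0)
              (pvRecurA W b f target (n-1) M).2 hex.2 (by omega) (by omega)
          rw [hk'] at hin
          simp only []
          constructor
          · rw [hex.1, hin.1, hpure, if_neg hwgt]
          · intro k' t' v hget
            rw [PySem.Dict.get?_insert] at hget
            by_cases heq : (k', t') = (n, target)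
            · rw [if_pos heq] at hget
              obtain ⟨rfl, rfl⟩ := Prod.mk.injEq .. ▸ heq
              cases hget
              rw [hex.1, hin.1, hpure, if_neg hwgt]
            · rw [if_neg heq] at hget
              exact hin.2 k' t' v hget

lemma cell_eq (W : List Int) (T : Int) (k : Nat) (t : Int)
    (hw : 0 ≤ PySem.List.pyGetD W (k : Int) 0) (ht0 : 0 ≤ t) (ht1 : t < T + 1) :
    (let w := PySem.List.pyGetD W (k : Int) 0
     let best := PySem.List.pyGetD ((PySem.List.pyRange 0 (T+1) 1).map (fun t => pureRec W k t)) t []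
     if 0 ≤ w ∧ w ≤ t then
       let cand := w :: PySem.List.pyGetD ((PySem.List.pyRange 0 (T+1) 1).map (fun t => pureRec W k t)) (t - w) []
       if cand.sum > best.sum then cand else best
     else best) = pureRec W (k+1) t := by
  set w := PySem.List.pyGetD W (k : Int) 0 with hwdef
  simp only []
  rw [PySem.List.pyGetD_map_pyRange_of_nonneg _ _ _ _ ht0 ht1]
  by_cases hle : 0 ≤ w ∧ w ≤ t
  · rw [if_pos hle]
    rw [PySem.List.pyGetD_map_pyRange_of_nonneg _ _ _ _ (by omega) (by omega)]
    by_cases ht : t ≤ 0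
    · have htz : t = 0 := by omega
      have hwz : w = 0 := by omega
      subst htz
      rw [pureRec_nonpos W (k+1) 0 le_rfl, pureRec_nonpos W k 0 le_rfl, hwz]
      simp [pureRec_nonpos]
    · rw [pureRec]
      simp only [if_neg ht, ← hwdef, if_neg (by omega : ¬ w > t)]
  · rw [if_neg hle]
    have hwt : w > t := by omega
    by_cases ht : t ≤ 0
    · rw [pureRec_nonpos W (k+1) t ht, pureRec_nonpos W k t ht]
    · rw [pureRec]
      simp only [if_neg ht, ← hwdef, if_pos hwt]

lemma rows_eq (W : List Int) (T : Int) (N : Nat)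
    (hw : ∀ k : Nat, k < N → 0 ≤ PySem.List.pyGetD W (k : Int) 0) :
    (PySem.List.pyRange 0 (N : Int) 1).foldl
      (fun row k =>
        let w := PySem.List.pyGetD W k 0
        (PySem.List.pyRange 0 (T + 1) 1).foldl
          (fun acc t =>
            let best := PySem.List.pyGetD row t []
            let best :=
              if 0 ≤ w ∧ w ≤ t then
                let cand := w :: PySem.List.pyGetD row (t - w) []
                if cand.sum > best.sum then cand else best
              else best
            acc ++ [best]) [])
      ((PySem.List.pyRange 0 (T + 1) 1).map (fun _ => ([] : List Int)))
    = (PySem.List.pyRange 0 (T + 1) 1).map (fun t => pureRec W N t) := by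
  induction N with
  | zero =>
    rw [show ((0:Nat):Int) = 0 by rfl, PySem.List.pyRange_one_eq_nil le_rfl]
    simp [pureRec]
  | succ N ih =>
    have hcast : ((N + 1 : Nat) : Int) = (N : Int) + 1 := by push_cast; ring
    rw [hcast, PySem.List.pyRange_one_succ_right (show (0:Int) ≤ (N:Int) from by positivity),
        List.foldl_append, ih (fun k hk => hw k (by omega))]
    simp only [List.foldl_cons, List.foldl_nil]
    rw [PySem.List.foldl_append_singleton_eq_map]
    simp only [List.nil_append]
    apply List.map_congr_left
    intro t htmem
    rw [PySem.List.mem_pyRange_one] at htmem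
    exact cell_eq W T N t (hw N (by omega)) htmem.1 htmem.2

lemma invM_empty (W : List Int) : InvM W PySem.Dict.empty := by
  intro k t v h
  simp [PySem.Dict.get?_empty] at h

-- ===== VERDICT (by name: the statement is the Claim_ definition above) =====
theorem recursive_subset_sum_spec : Claim_equal_recursive_subset_sum := by
  intro W Wmax n b _ hpre
  unfold Spec_recursive_subset_sum recursive_subset_sum recursive_subset_sum_alt
  by_cases hWm : Wmax ≤ 0
  · rw [pvRecurA, if_pos (Or.inl hWm), if_pos hWm]
  · rw [if_neg hWm]
    obtain ⟨hn, hlen, hwt⟩ : 0 ≤ n ∧ n ≤ W.length ∧ ∀ w ∈ W.take n.toNat, 0 ≤ w :=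
      hpre.resolve_left hWm
    have hw : ∀ k : Nat, k < n.toNat → 0 ≤ PySem.List.pyGetD W (k : Int) 0 := by
      intro k hk
      have hkW : k < W.length := by omega
      rw [PySem.List.pyGetD_natCast, List.getD_eq_getElem W 0 hkW]
      refine hwt _ ?_
      have : (W.take n.toNat)[k]'(by simp; omega) = W[k] := List.getElem_take
      exact this ▸ List.getElem_mem _
    obtain ⟨N, rfl⟩ : ∃ N : Nat, n = (N : Int) := ⟨n.toNat, by omega⟩
    rw [Int.toNat_natCast] at hw
    have hA := (recA_correct W b ((N:Int).toNat + 1) N Wmax PySem.Dict.empty (invM_empty W) hn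
        (by simp)).1
    rw [Int.toNat_natCast] at hA ⊢
    rw [hA]
    simp only [rows_eq W Wmax N hw]
    rw [PySem.List.pyGetD_map_pyRange_of_nonneg _ _ _ _ (by omega) (by omega)]
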